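-- pv_equiv track=rewrite | github.com/wdurczak/ok_2025 | core/services/graph6.py | _encode_n_graph6
-- ===== SOURCE A (Python) =====
-- def _encode_n_graph6(n: int) -> str:
--     """
--     @brief Koduje liczbę wierzchołków n zgodnie ze specyfikacją graph6
--
--     Funkcja implementuje standardowe kodowanie rozmiaru grafu dla graph6:
--     - dla n <= 62: pojedynczy znak (n + 63),
--     - dla 63 <= n <= 258047: prefiks "~" oraz 3 znaki (18 bitów),
--     - dla 258048 <= n <= 2^36 - 1: prefiks "~~" oraz 6 znaków (36 bitów).
--
--     @param n Liczba wierzchołków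
--     @return Prefiks graph6 kodujący n
--     @throws ValueError Gdy n < 0 lub n przekracza obsługiwany zakres
--     """
--     if n < 0:
--         raise ValueError("graph6: n must be >= 0")
--
--     if n <= 62:
--         return chr(n + 63)
--
--     if n <= 258047:
--         x = n
--         b1 = (x >> 12) & 0x3F
--         b2 = (x >> 6) & 0x3F
--         b3 = x & 0x3F
--         return "~" + chr(b1 + 63) + chr(b2 + 63) + chr(b3 + 63)
--
--     if n <= 68719476735:
--         x = n
--         out = ["~", "~"]
--         for shift in (30, 24, 18, 12, 6, 0):
--             out.append(chr(((x >> shift) & 0x3F) + 63))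
--         return "".join(out)
--
--     raise ValueError("graph6: n too large")
-- ===== SOURCE B (Python) =====
-- def _encode_n_graph6(n: int) -> str:
--     if n < 0:
--         raise ValueError("graph6: n must be >= 0")
--     if n <= 62:
--         return chr(n + 63)
--     if n <= 258047:
--         prefix, bits = "~", 18
--     elif n <= 68719476735:
--         prefix, bits = "~~", 36
--     else:
--         raise ValueError("graph6: n too large")
--     out = [prefix]
--     s = bin(n)[2:].zfill(bits)
--     while s:
--         out.append(chr(int(s[:6], 2) + 63))
--         s = s[6:]
--     return "".join(out)
-- ===== Notes on version B (the rewrite author's own statement) =====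
-- stated objective: alternative
-- what changed: B works on the textual binary representation instead of arithmetic: it builds bin(n) zero-filled to 18/36 bits and consumes the bit-string six characters at a time with int(chunk,2)+63, replacing A's unrolled shift/mask block and its MSB-first shift loop.
import Mathlib
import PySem

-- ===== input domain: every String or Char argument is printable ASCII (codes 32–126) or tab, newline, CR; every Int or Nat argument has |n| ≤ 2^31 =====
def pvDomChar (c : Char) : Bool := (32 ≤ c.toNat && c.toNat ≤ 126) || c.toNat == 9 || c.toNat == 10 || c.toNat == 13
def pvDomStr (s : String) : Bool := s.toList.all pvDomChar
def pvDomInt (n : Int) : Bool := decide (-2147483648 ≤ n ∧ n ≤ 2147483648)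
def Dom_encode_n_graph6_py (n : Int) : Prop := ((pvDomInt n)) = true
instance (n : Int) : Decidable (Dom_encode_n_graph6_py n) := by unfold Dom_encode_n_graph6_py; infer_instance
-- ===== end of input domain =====

-- ===== PORT A =====
-- Header: B encodes via the textual binary representation — bin(n) zero-filled to
-- 18/36 bits, consumed six bit-characters at a time with int(chunk,2)+63 — instead
-- of A's arithmetic shift/mask extraction; objective: alternative.
-- Port of A, step for step.  Strings are built as List Char and wrapped in String.ofList
-- once; `x >> s` and `x & 0x3F` (x ≥ 0 on every reached branch) are
-- PySem.Int.floordiv x 2^s and PySem.Int.mod x 64, exact there.  On the raising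
-- branches (n < 0; n too large) the port returns "" — outside Pre_encode_n_graph6_py.
def encode_n_graph6_py (n : Int) : String :=
  if n < 0 then ""
  else if n ≤ 62 then String.ofList [Char.ofNat (n + 63).toNat]
  else if n ≤ 258047 then
    -- b1, b2, b3 = the three 6-bit fields, written in place
    String.ofList ['~',
      Char.ofNat (PySem.Int.mod (PySem.Int.floordiv n 4096) 64 + 63).toNat,
      Char.ofNat (PySem.Int.mod (PySem.Int.floordiv n 64) 64 + 63).toNat,
      Char.ofNat (PySem.Int.mod n 64 + 63).toNat]
  else if n ≤ 68719476735 then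
    -- out = ["~", "~"]; for shift in (30, 24, 18, 12, 6, 0): out.append(...)
    String.ofList ([30, 24, 18, 12, 6, 0].foldl
      (fun acc (s : Nat) =>
        acc ++ [Char.ofNat ((PySem.Int.mod (PySem.Int.floordiv n ((2 : Int) ^ s)) 64 + 63)).toNat])
      ['~', '~'])
  else ""

-- ===== PORT B =====
-- bin(x)[2:] for x > 0 (all reached inputs have x ≥ 63): binary digits, MSB first;
-- ported by hand, exact there (Python's bin has no other output on positive ints).
def pvBinChars (x : Nat) : List Char :=
  if _h : x = 0 then []
  else pvBinChars (x / 2) ++ [if x % 2 = 1 then '1' else '0']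
decreasing_by exact Nat.div_lt_self (Nat.pos_of_ne_zero _h) one_lt_two

-- int(t, 2): hand port of the base-2 reading, exact on '0'/'1' strings (every
-- chunk Source B reads is one).
def pvIntOfBin (s : List Char) : Nat :=
  s.foldl (fun a c => 2 * a + (if c = '1' then 1 else 0)) 0

-- the while loop of Source B: peel six bit-characters at a time (s[:6] / s[6:] are
-- take/drop — nonnegative slice bounds)
def pvChunks (s : List Char) : List Char :=
  if _h : s = [] then []
  else Char.ofNat (pvIntOfBin (s.take 6) + 63) :: pvChunks (s.drop 6)
termination_by s.length
decreasing_by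
  simp only [List.length_drop]
  exact Nat.sub_lt (List.length_pos_of_ne_nil _h) (by omega)

-- shared tail of Source B after (prefix, bits) is chosen: zfill of the sign-less digit
-- string is a plain left-pad with '0'
def pvEncodeBig (n : Int) (pre : List Char) (bits : Nat) : String :=
  String.ofList (pre ++ pvChunks
    (List.replicate (bits - (pvBinChars n.toNat).length) '0' ++ pvBinChars n.toNat))

def encode_n_graph6_py_alt (n : Int) : String :=
  if n < 0 then ""
  else if n ≤ 62 then String.ofList [Char.ofNat (n + 63).toNat]
  else if n ≤ 258047 then pvEncodeBig n ['~'] 18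
  else if n ≤ 68719476735 then pvEncodeBig n ['~', '~'] 36
  else ""

-- ===== PRECONDITION & SPEC =====
-- Pre_: exactly where A returns normally; for n < 0 or n > 68719476735 A raises
-- ValueError (the upper raise is unreachable inside Dom, which caps n at 2^31).
def Pre_encode_n_graph6_py (n : Int) : Prop := 0 ≤ n ∧ n ≤ 68719476735
instance (n : Int) : Decidable (Pre_encode_n_graph6_py n) := by
  unfold Pre_encode_n_graph6_py; infer_instance
def pvWitness_encode_n_graph6_py : Int := 300000
def Spec_encode_n_graph6_py (n : Int) (out : String) : Prop := out = encode_n_graph6_py_alt n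
instance (n : Int) (out : String) : Decidable (Spec_encode_n_graph6_py n out) := by unfold Spec_encode_n_graph6_py; infer_instance

-- ===== CLAIM (what is proved, stated in full; the proofs are below) =====
def Claim_equal_encode_n_graph6_py : Prop := ∀ (n : Int), Dom_encode_n_graph6_py n → Pre_encode_n_graph6_py n → Spec_encode_n_graph6_py n (encode_n_graph6_py n)

-- ===== LEMMAS AND PROOFS =====

-- proof-only: the fixed-width (b bits, MSB first) binary rendering of x
def pvBinPad (b x : Nat) : List Char :=
  match b with
  | 0 => []
  | b + 1 => pvBinPad b (x / 2) ++ [if x % 2 = 1 then '1' else '0']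

theorem length_pvBinPad (b x : Nat) : (pvBinPad b x).length = b := by
  induction b generalizing x with
  | zero => rfl
  | succ b ih => simp [pvBinPad, ih]

theorem pvBinPad_zero (b : Nat) : pvBinPad b 0 = List.replicate b '0' := by
  induction b with
  | zero => rfl
  | succ b ih => simp [pvBinPad, ih, List.replicate_succ']

theorem pad_pvBinChars (b x : Nat) (h : x < 2 ^ b) :
    List.replicate (b - (pvBinChars x).length) '0' ++ pvBinChars x = pvBinPad b x := by
  induction b generalizing x with
  | zero =>
      have hx : x = 0 := by omega
      subst hx; simp [pvBinChars, pvBinPad]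
  | succ b ih =>
      by_cases hx : x = 0
      · subst hx; simp [pvBinChars, pvBinPad_zero]
      · rw [pvBinChars]
        simp only [hx, dif_neg, not_false_iff]
        have hlt : x / 2 < 2 ^ b := by
          have : (2 : Nat) ^ (b + 1) = 2 ^ b * 2 := pow_succ 2 b
          omega
        have := ih (x / 2) hlt
        rw [pvBinPad, ← this]
        simp only [List.length_append, List.length_singleton]
        rw [show b + 1 - ((pvBinChars (x / 2)).length + 1) = b - (pvBinChars (x / 2)).length by omega]
        simp [List.append_assoc]

theorem pvIntOfBin_append_bit (L : List Char) (c : Char) :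
    pvIntOfBin (L ++ [c]) = 2 * pvIntOfBin L + (if c = '1' then 1 else 0) := by
  simp [pvIntOfBin, List.foldl_append]

theorem pvIntOfBin_pvBinPad (b x : Nat) : pvIntOfBin (pvBinPad b x) = x % 2 ^ b := by
  induction b generalizing x with
  | zero => simp [pvBinPad, pvIntOfBin, Nat.mod_one]
  | succ b ih =>
      rw [pvBinPad, pvIntOfBin_append_bit, ih,
        show (2 : Nat) ^ (b + 1) = 2 * 2 ^ b by rw [pow_succ, Nat.mul_comm],
        Nat.mod_mul]
      by_cases hx : x % 2 = 1 <;> simp [hx] <;> omega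

theorem pvBinPad_split (a b x : Nat) :
    pvBinPad (a + b) x = pvBinPad a (x / 2 ^ b) ++ pvBinPad b x := by
  induction b generalizing x with
  | zero => simp [pvBinPad]
  | succ b ih =>
      show pvBinPad ((a + b) + 1) x = _
      rw [pvBinPad, ih, pvBinPad, List.append_assoc, Nat.div_div_eq_div_mul,
        show (2 : Nat) * 2 ^ b = 2 ^ (b + 1) by rw [pow_succ, Nat.mul_comm]]

theorem pvChunks_nil : pvChunks [] = [] := by rw [pvChunks.eq_def]; simp

theorem pvChunks_block (h : Nat) (rest : List Char) :
    pvChunks (pvBinPad 6 h ++ rest) = Char.ofNat (h % 64 + 63) :: pvChunks rest := by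
  have hne : pvBinPad 6 h ++ rest ≠ [] := by
    intro hc
    have := congrArg List.length hc
    simp [length_pvBinPad] at this
  rw [pvChunks.eq_def]
  simp only [hne, dif_neg, not_false_iff]
  have h6 : (pvBinPad 6 h).length = 6 := length_pvBinPad 6 h
  rw [List.take_left' h6, List.drop_left' h6, pvIntOfBin_pvBinPad]
  norm_num

theorem pvChunks_single (h : Nat) :
    pvChunks (pvBinPad 6 h) = [Char.ofNat (h % 64 + 63)] := by
  rw [← List.append_nil (pvBinPad 6 h), pvChunks_block, pvChunks_nil]

-- ===== VERDICT (by name: the statement is the Claim_ definition above) =====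
theorem encode_n_graph6_py_spec : Claim_equal_encode_n_graph6_py := by
  intro n _hdom hpre
  obtain ⟨h0, hub⟩ := hpre
  unfold Spec_encode_n_graph6_py encode_n_graph6_py encode_n_graph6_py_alt
  have fd : ∀ (a b : Int), 0 < b → PySem.Int.floordiv a b = a / b :=
    fun a b hb => PySem.Int.floordiv_eq_ediv_of_pos hb
  have md : ∀ a : Int, PySem.Int.mod a 64 = a % 64 :=
    fun a => PySem.Int.mod_eq_emod_of_pos (by norm_num)
  obtain ⟨m, rfl⟩ : ∃ m : Nat, n = (m : Int) := ⟨n.toNat, (Int.toNat_of_nonneg h0).symm⟩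
  split_ifs with h1 h2 h3 h4big <;> try clear h4big
  · rfl
  · rfl
  · -- 18-bit branch
    have hm : m < 2 ^ 18 := by norm_num; omega
    unfold pvEncodeBig
    rw [Int.toNat_natCast, pad_pvBinChars 18 m hm,
        show (18 : Nat) = 6 + 6 + 6 by rfl,
        pvBinPad_split (6 + 6) 6 m, pvBinPad_split 6 6 (m / 2 ^ 6),
        List.append_assoc, pvChunks_block, pvChunks_block, pvChunks_single]
    simp only [fd _ _ (by norm_num : (0:Int) < 4096), fd _ _ (by norm_num : (0:Int) < 64), md]
    norm_num
    refine congrArg String.ofList ?_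
    simp only [List.cons.injEq, and_true, true_and]
    refine ⟨?_, ?_, ?_⟩ <;> (congr 1 <;> omega)
  · -- 36-bit branch
    have hm : m < 2 ^ 36 := by norm_num; omega
    unfold pvEncodeBig
    rw [Int.toNat_natCast, pad_pvBinChars 36 m hm,
        show (36 : Nat) = 6 + 6 + 6 + 6 + 6 + 6 by rfl,
        pvBinPad_split (6 + 6 + 6 + 6 + 6) 6 m,
        pvBinPad_split (6 + 6 + 6 + 6) 6 (m / 2 ^ 6),
        pvBinPad_split (6 + 6 + 6) 6 (m / 2 ^ 6 / 2 ^ 6),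
        pvBinPad_split (6 + 6) 6 (m / 2 ^ 6 / 2 ^ 6 / 2 ^ 6),
        pvBinPad_split 6 6 (m / 2 ^ 6 / 2 ^ 6 / 2 ^ 6 / 2 ^ 6)]
    simp only [List.append_assoc]
    rw [pvChunks_block, pvChunks_block, pvChunks_block, pvChunks_block, pvChunks_block,
        pvChunks_single]
    simp only [List.foldl]
    simp only [fd _ _ (by positivity : (0:Int) < 2 ^ 30),
      fd _ _ (by positivity : (0:Int) < 2 ^ 24), fd _ _ (by positivity : (0:Int) < 2 ^ 18),
      fd _ _ (by positivity : (0:Int) < 2 ^ 12), fd _ _ (by positivity : (0:Int) < 2 ^ 6),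
      md]
    norm_num
    refine congrArg String.ofList ?_
    simp only [List.cons.injEq, and_true, true_and]
    refine ⟨?_, ?_, ?_, ?_, ?_, ?_⟩ <;> (congr 1 <;> omega)
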